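-- pv_equiv track=rewrite | github.com/CataBlazquez/TPO | Mensaje_Espejo_Y_Acceso_Botiquin.py | procesar_mensaje
-- ===== SOURCE A (Python) =====
-- def procesar_mensaje(mensaje):
--     # Extraer cada tercera letra usando slice
--     extraer_letra = mensaje[::3]
--
--     # Inicializar variables
--     palabras = []
--     mensaje_en_construcción = ""
--
--     # Iterar sobre cada carácter en el mensaje extraído
--     for caracter in extraer_letra:
--         if caracter.isupper() and mensaje_en_construcción:
--             # Si el carácter es mayúscula y mensaje_en_construcción no está vacío, agregar mensaje_en_construcción a la lista de palabras
--             palabras.append(mensaje_en_construcción)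
--             mensaje_en_construcción = caracter
--         else:
--             # De lo contrario, agregar el carácter a mensaje_en_construcción
--             mensaje_en_construcción += caracter
--
--     # Agregar la última palabra a la lista
--     if mensaje_en_construcción:
--         palabras.append(mensaje_en_construcción)
--
--     # Convertir el mensaje resultante a minúsculas menos la primera letra que debe ir en mayúscula
--     mensaje_descifrado = " ".join(palabras).lower().capitalize()
--
--     return mensaje_descifrado
-- ===== SOURCE B (Python) =====
-- def procesar_mensaje(mensaje):
--     # Staged passes: extract, collect word-boundary indices, slice the words out.
--     e = mensaje[::3]
--     if not e:
--         return ""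
--     cortes = [0] + [i for i, c in enumerate(e) if i > 0 and c.isupper()] + [len(e)]
--     palabras = [e[a:b] for a, b in zip(cortes, cortes[1:])]
--     return " ".join(palabras).lower().capitalize()
-- ===== Notes on version B (the rewrite author's own statement) =====
-- stated objective: alternative
-- what changed: B replaces A's single-pass character accumulator (building each word char by char inside one loop with a 'word in construction' state) by staged passes: it first collects the word-start boundary indices (positions > 0 whose char is uppercase), then slices the words out between consecutive boundaries.
import Mathlib
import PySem

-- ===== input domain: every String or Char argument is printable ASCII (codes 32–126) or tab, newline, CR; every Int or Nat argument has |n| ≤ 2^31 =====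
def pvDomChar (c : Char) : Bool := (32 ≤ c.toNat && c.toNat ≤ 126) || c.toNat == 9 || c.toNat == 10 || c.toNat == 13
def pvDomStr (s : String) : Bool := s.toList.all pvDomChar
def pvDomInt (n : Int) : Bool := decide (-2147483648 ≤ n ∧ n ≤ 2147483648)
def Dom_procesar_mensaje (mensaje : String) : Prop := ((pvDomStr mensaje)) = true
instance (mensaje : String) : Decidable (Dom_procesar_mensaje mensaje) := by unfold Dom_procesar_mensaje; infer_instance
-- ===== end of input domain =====

-- B replaces A's single-pass character accumulator by staged passes (collect word-boundary
-- indices, then slice the words out between consecutive boundaries); objective: alternative.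

-- ===== PORT A =====
-- " ".join(palabras).lower().capitalize()  — shared final line of both Pythons; .capitalize()
-- (uppercase first char, lower the rest) is ported by hand, exact on the ASCII domain
def pvFinish (palabras : List (List Char)) : String :=
  match PySem.Chars.lower (PySem.Chars.join [' '] palabras) with
  | [] => String.ofList []
  | c :: cs => String.ofList (PySem.Chars.upperChar c :: PySem.Chars.lower cs)

-- loop body of A: split off the current word when the char is uppercase and the word is nonempty
def pvStepA (st : List (List Char) × List Char) (c : Char) : List (List Char) × List Char :=
  if PySem.Chars.isupper c ∧ st.2 ≠ [] then (st.1 ++ [st.2], [c]) else (st.1, st.2 ++ [c])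

def procesar_mensaje (mensaje : String) : String :=
  let extraer_letra := (PySem.List.slice? mensaje.toList none none 3).getD []   -- mensaje[::3]
  let st := extraer_letra.foldl pvStepA ([], [])
  let palabras := if st.2 ≠ [] then st.1 ++ [st.2] else st.1
  pvFinish palabras

-- ===== PORT B =====
def procesar_mensaje_alt (mensaje : String) : String :=
  let e := (PySem.List.slice? mensaje.toList none none 3).getD []               -- mensaje[::3]
  if e = [] then String.ofList []                                                -- if not e: return ""
  else
    -- cortes = [0] + [i for i, c in enumerate(e) if i > 0 and c.isupper()] + [len(e)]
    let cortes : List Int :=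
      (0 :: ((PySem.List.enumerate e 0).filter
        (fun p => decide (0 < p.1) && PySem.Chars.isupper p.2)).map Prod.fst) ++ [(e.length : Int)]
    -- palabras = [e[a:b] for a, b in zip(cortes, cortes[1:])]
    let palabras := (cortes.zip (PySem.List.slice cortes (some 1) none)).map
        (fun p => PySem.List.slice e (some p.1) (some p.2))
    pvFinish palabras

-- ===== PRECONDITION & SPEC =====
def Spec_procesar_mensaje (mensaje : String) (out : String) : Prop := out = procesar_mensaje_alt mensaje
instance (mensaje : String) (out : String) : Decidable (Spec_procesar_mensaje mensaje out) := by unfold Spec_procesar_mensaje; infer_instance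

-- ===== CLAIM (what is proved, stated in full; the proofs are below) =====
def Claim_equal_procesar_mensaje : Prop := ∀ (mensaje : String), Dom_procesar_mensaje mensaje → Spec_procesar_mensaje mensaje (procesar_mensaje mensaje)

-- ===== LEMMAS AND PROOFS =====

-- the recursive splitter both word lists are proved equal to: words of `cur ++ l`,
-- splitting before each uppercase char of l
def pvG (cur : List Char) : List Char → List (List Char)
  | [] => [cur]
  | c :: xs => if PySem.Chars.isupper c then cur :: pvG [c] xs else pvG (cur ++ [c]) xs

-- A-side: the fold plus the final flush computes pvG
theorem pvFoldA (l : List Char) : ∀ ws cur, cur ≠ [] →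
    (let st := l.foldl pvStepA (ws, cur);
     if st.2 ≠ [] then st.1 ++ [st.2] else st.1) = ws ++ pvG cur l := by
  induction l with
  | nil => intro ws cur h; simp [pvG, h]
  | cons c xs ih =>
    intro ws cur h
    by_cases hu : PySem.Chars.isupper c = true
    · have hs : pvStepA (ws, cur) c = (ws ++ [cur], [c]) := by simp [pvStepA, hu, h]
      simp only [List.foldl_cons, hs]
      rw [ih (ws ++ [cur]) [c] (by simp)]
      simp [pvG, hu]
    · have hs : pvStepA (ws, cur) c = (ws, cur ++ [c]) := by simp [pvStepA, hu]
      simp only [List.foldl_cons, hs]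
      rw [ih ws (cur ++ [c]) (by simp)]
      simp [pvG, hu]

-- B-side: the uppercase positions of xs, offset by s
def pvUps (xs : List Char) (s : Int) : List Int :=
  ((PySem.List.enumerate xs s).filter (fun p => PySem.Chars.isupper p.2)).map Prod.fst

theorem pvUps_cons (c : Char) (xs : List Char) (s : Int) :
    pvUps (c :: xs) s =
      if PySem.Chars.isupper c then s :: pvUps xs (s + 1) else pvUps xs (s + 1) := by
  by_cases hu : PySem.Chars.isupper c = true <;>
    simp [pvUps, PySem.List.enumerate_cons, hu]

-- slicing between consecutive cut indices
def pvWordsOf (f : List Char) (cuts : List Int) : List (List Char) :=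
  (cuts.zip cuts.tail).map (fun p => PySem.List.slice f (some p.1) (some p.2))

-- pvWordsOf over two-or-more cuts
theorem pvWordsOf_pair (f : List Char) (a b : Int) :
    pvWordsOf f [a, b] = [PySem.List.slice f (some a) (some b)] := by
  simp [pvWordsOf]

theorem pvWordsOf_cons2 (f : List Char) (a b : Int) (rest : List Int) :
    pvWordsOf f (a :: b :: rest)
      = PySem.List.slice f (some a) (some b) :: pvWordsOf f (b :: rest) := by
  simp [pvWordsOf]

-- B-side invariant: slicing f = g ++ cur ++ xs at the cuts (start of cur, uppercase
-- positions of xs, end of f) yields exactly the words pvG cur xs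
theorem pvSlice_eq_pvG (xs : List Char) : ∀ (g cur : List Char) (s : Int), cur ≠ [] →
    s = (g.length : Int) →
    pvWordsOf (g ++ cur ++ xs)
      (s :: pvUps xs (s + (cur.length : Int)) ++ [s + (cur.length : Int) + (xs.length : Int)])
    = pvG cur xs := by
  induction xs with
  | nil =>
    intro g cur s h hs
    simp only [pvUps, PySem.List.enumerate_nil, List.filter_nil, List.map_nil,
      List.nil_append, List.length_nil, Nat.cast_zero, add_zero, List.append_nil,
      List.singleton_append]
    rw [pvWordsOf_pair, hs, PySem.List.slice_natCast_add]
    rw [List.drop_left]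
    simp [pvG]
  | cons c xs ih =>
    intro g cur s h hs
    rw [pvUps_cons]
    by_cases hu : PySem.Chars.isupper c = true
    · simp only [hu, if_true, List.cons_append]
      rw [pvWordsOf_cons2]
      have hfirst : PySem.List.slice (g ++ cur ++ c :: xs) (some s)
          (some (s + (cur.length : Int))) = cur := by
        rw [hs, PySem.List.slice_natCast_add,
          show g ++ cur ++ c :: xs = g ++ (cur ++ c :: xs) by simp,
          List.drop_left, List.take_left]
      have hlast : s + (cur.length : Int) + ((c :: xs).length : Int)
          = s + (cur.length : Int) + 1 + (xs.length : Int) := by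
        push_cast [List.length_cons]; ring
      have ihx := ih (g ++ cur) [c] (s + (cur.length : Int)) (by simp) (by simp [hs])
      simp only [List.length_cons, List.length_nil, Nat.zero_add, Nat.cast_one,
        List.append_assoc, List.singleton_append] at ihx
      rw [hfirst, hlast]
      simp only [pvG, hu, if_true]
      rw [List.append_assoc]
      exact congrArg (List.cons cur) ihx
    · simp only [hu, Bool.false_eq_true, if_false]
      have ihx := ih g (cur ++ [c]) s (by simp) hs
      simp only [List.append_assoc, List.singleton_append, List.length_append,
        List.length_cons, List.length_nil, Nat.zero_add, Nat.cast_add, Nat.cast_one,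
        ← add_assoc] at ihx
      rw [show pvG cur (c :: xs) = pvG (cur ++ [c]) xs by simp [pvG, hu]]
      rw [show s + (cur.length : Int) + (((c :: xs).length : Nat) : Int)
            = s + (cur.length : Int) + 1 + (xs.length : Int) by push_cast [List.length_cons]; ring]
      rw [List.append_assoc]
      exact ihx

-- the port-B cut list is the invariant's cut list (the i > 0 test drops only index 0)
theorem pvCuts_eq (c : Char) (xs : List Char) :
    ((0 : Int) :: ((PySem.List.enumerate (c :: xs) 0).filter
        (fun p => decide (0 < p.1) && PySem.Chars.isupper p.2)).map Prod.fst)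
      ++ [(((c :: xs).length : Int))]
    = (0 : Int) :: pvUps xs 1 ++ [(((c :: xs).length : Int))] := by
  have hfil : (PySem.List.enumerate xs 1).filter
      (fun p => decide (0 < p.1) && PySem.Chars.isupper p.2)
      = (PySem.List.enumerate xs 1).filter (fun p => PySem.Chars.isupper p.2) := by
    apply List.filter_congr
    intro p hp
    rcases (PySem.List.mem_enumerate_iff xs 1 p).1 hp with ⟨k, hk, rfl⟩
    have hpos : (0 : Int) < 1 + (k : Int) := by omega
    simp [hpos]
  simp [PySem.List.enumerate_cons, hfil, pvUps]

-- ===== VERDICT (by name: the statement is the Claim_ definition above) =====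
theorem procesar_mensaje_spec : Claim_equal_procesar_mensaje := by
  intro mensaje _
  unfold Spec_procesar_mensaje procesar_mensaje procesar_mensaje_alt
  simp only
  cases he : (PySem.List.slice? mensaje.toList none none 3).getD [] with
  | nil => decide
  | cons c xs =>
    rw [if_neg (show ¬(c :: xs = []) by simp)]
    rw [pvCuts_eq, PySem.List.slice_from_one]
    have hA : pvStepA (([] : List (List Char)), ([] : List Char)) c = ([], [c]) := by
      simp [pvStepA]
    simp only [List.foldl_cons, hA]
    rw [pvFoldA xs [] [c] (by simp), List.nil_append]
    have hB := pvSlice_eq_pvG xs [] [c] 0 (by simp) (by simp)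
    simp only [List.nil_append, List.length_cons, List.length_nil, Nat.cast_one,
      zero_add] at hB
    have hlast : ((c :: xs).length : Int) = 0 + 1 + (xs.length : Int) := by push_cast [List.length_cons]; ring
    rw [hlast]
    unfold pvWordsOf at hB
    rw [← hB]
    rfl
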